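-- pv_equiv track=rewrite | github.com/tahnhuy/2d_array_python | square_matrix.py | findRowPrime
-- ===== SOURCE A (Python) =====
-- import math
--
-- def isPrime(x):
--     if x < 2:
--         return False
--     else:
--         for i in range(2, int(math.sqrt(x) + 1)):
--             if x % i == 0:
--                 return False
--
--     return True
--
-- def findRowPrime(list, level):
--     count = 0
--     max = 0
--     primeRow = 0
--     for i in range(level):
--         for j in range(level):
--             if isPrime(list[j][i]):
--                 count += 1
--         if count > max:
--             max = count
--             primeRow = i
--         count = 0
--
--     return primeRow
-- ===== SOURCE B (Python) =====
-- import math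
--
-- def _is_prime(x):
--     return x >= 2 and all(x % d for d in range(2, math.isqrt(x) + 1))
--
-- def findRowPrime(list, level):
--     counts = [0] * level
--     for row in list[:level]:
--         for i in range(level):
--             if _is_prime(row[i]):
--                 counts[i] += 1
--     best, res = 0, 0
--     for i, c in enumerate(counts):
--         if c > best:
--             best, res = c, i
--     return res
-- ===== Notes on version B (the rewrite author's own statement) =====
-- stated objective: alternative
-- what changed: Replaces A's column-at-a-time count-and-compare (inner scan re-reading every row per column, running max interleaved with counting) by a row-major sweep that maintains a per-column counts array and a separate final first-strict-max scan over that array.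
import Mathlib
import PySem

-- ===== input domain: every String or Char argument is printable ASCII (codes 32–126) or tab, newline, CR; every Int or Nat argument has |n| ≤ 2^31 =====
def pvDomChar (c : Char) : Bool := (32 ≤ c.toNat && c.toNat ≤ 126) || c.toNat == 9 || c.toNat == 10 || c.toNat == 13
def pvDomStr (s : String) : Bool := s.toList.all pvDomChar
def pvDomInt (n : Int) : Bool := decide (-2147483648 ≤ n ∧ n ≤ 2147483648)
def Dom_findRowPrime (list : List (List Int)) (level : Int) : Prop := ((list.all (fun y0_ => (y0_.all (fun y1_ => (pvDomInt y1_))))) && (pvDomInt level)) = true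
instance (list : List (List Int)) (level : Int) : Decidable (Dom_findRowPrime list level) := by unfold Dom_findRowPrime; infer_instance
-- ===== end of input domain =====

-- B replaces A's column-at-a-time count-and-compare by a row-major sweep over a per-column counts
-- array followed by a first-strict-max scan (objective: alternative decomposition, same cost).

-- ===== PORT A =====
-- Python's bound int(math.sqrt(x)+1) equals Nat.sqrt x.toNat + 1 on the domain |x| ≤ 2^31, except
-- that near a perfect square the float may round up and admit one extra candidate isqrt(x)+1;
-- such a candidate can never divide x ≥ 2 (its cofactor < sqrt x would have been found first),
-- so the Boolean below is exactly what A's isPrime returns on the domain.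
def isPrimeA (x : Int) : Bool :=
  if x < 2 then false
  else (PySem.List.pyRange 2 ((Nat.sqrt x.toNat : Int) + 1) 1).all
        (fun i => !(PySem.Int.mod x i == 0))

def findRowPrime (list : List (List Int)) (level : Int) : Int :=
  let fin := (PySem.List.pyRange 0 level 1).foldl
    (fun (st : Int × Int × Int) i =>
      let count := (PySem.List.pyRange 0 level 1).foldl
        (fun count j =>
          if isPrimeA (PySem.List.pyGetD (PySem.List.pyGetD list j []) i 0)
          then count + 1 else count)
        st.1
      if count > st.2.1 then (0, count, i) else (0, st.2.1, st.2.2))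
    ((0 : Int), (0 : Int), (0 : Int))
  fin.2.2

-- ===== PORT B =====
-- same comment as for isPrimeA: math.isqrt(x) is Nat.sqrt x.toNat exactly
def isPrimeB (x : Int) : Bool :=
  decide (2 ≤ x) &&
    (PySem.List.pyRange 2 ((Nat.sqrt x.toNat : Int) + 1) 1).all
      (fun d => !(PySem.Int.mod x d == 0))

def findRowPrime_alt (list : List (List Int)) (level : Int) : Int :=
  let counts : List Int := List.replicate level.toNat 0
  let counts := (PySem.List.slice list none (some level)).foldl
    (fun cs row =>
      (PySem.List.pyRange 0 level 1).foldl
        (fun cs i =>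
          if isPrimeB (PySem.List.pyGetD row i 0)
          then PySem.List.pySetD cs i (PySem.List.pyGetD cs i 0 + 1)
          else cs)
        cs)
    counts
  let sel := (PySem.List.enumerate counts 0).foldl
    (fun (st : Int × Int) ic => if ic.2 > st.1 then (ic.2, ic.1) else st)
    ((0 : Int), (0 : Int))
  sel.2

-- ===== PRECONDITION & SPEC =====
-- Pre_ is exactly where A returns: for positive level, A reads list[j][i] for all i, j < level,
-- so the first level rows must exist and each have at least level entries (else IndexError).
def Pre_findRowPrime (list : List (List Int)) (level : Int) : Prop :=
  level.toNat ≤ list.length ∧ ∀ row ∈ list.take level.toNat, level.toNat ≤ row.length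
instance (list : List (List Int)) (level : Int) : Decidable (Pre_findRowPrime list level) := by
  unfold Pre_findRowPrime; infer_instance

def pvWitness_findRowPrime : List (List Int) × Int := ([[2, 3, 4], [4, 5, 6], [7, 8, 9]], 3)

def Spec_findRowPrime (list : List (List Int)) (level : Int) (out : Int) : Prop := out = findRowPrime_alt list level
instance (list : List (List Int)) (level : Int) (out : Int) : Decidable (Spec_findRowPrime list level out) := by unfold Spec_findRowPrime; infer_instance

-- ===== CLAIM (what is proved, stated in full; the proofs are below) =====
def Claim_equal_findRowPrime : Prop := ∀ (list : List (List Int)) (level : Int), Dom_findRowPrime list level → Pre_findRowPrime list level → Spec_findRowPrime list level (findRowPrime list level)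

-- ===== LEMMAS AND PROOFS =====

-- the per-cell indicator and per-column count both programs compute
def pvInd (row : List Int) (i : Int) : Int :=
  if isPrimeB (PySem.List.pyGetD row i 0) then 1 else 0

def pvCol (rows : List (List Int)) (i : Int) : Int :=
  (rows.map (fun r => pvInd r i)).sum

theorem isPrime_eq (x : Int) : isPrimeA x = isPrimeB x := by
  unfold isPrimeA isPrimeB
  by_cases h : x < 2 <;> simp [h, le_of_not_gt]

-- A's inner loop starting from c counts primes in column i of the first n rows
theorem A_inner (list : List (List Int)) (i : Int) :
    ∀ (n : Nat), n ≤ list.length → ∀ (c : Int),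
    (PySem.List.pyRange 0 (n : Int) 1).foldl
      (fun count j =>
        if isPrimeA (PySem.List.pyGetD (PySem.List.pyGetD list j []) i 0)
        then count + 1 else count) c
    = c + pvCol (list.take n) i := by
  intro n
  induction n with
  | zero => intro _ c; simp [pvCol]
  | succ n ih =>
    intro hn c
    have h1 : ((n : Int) + 1) = ((n + 1 : Nat) : Int) := by push_cast; ring
    rw [← h1, PySem.List.pyRange_one_succ_right (by positivity), List.foldl_append]
    rw [ih (by omega) c]
    obtain ⟨v, hv⟩ : ∃ v, list[n]? = some v :=
      ⟨_, List.getElem?_eq_getElem (by omega : n < list.length)⟩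
    have htake : list.take (n + 1) = list.take n ++ [v] := by
      rw [List.take_add_one, hv]; rfl
    rw [htake]
    simp only [List.foldl_cons, List.foldl_nil, pvCol, List.map_append, List.sum_append,
      List.map_cons, List.map_nil, List.sum_cons, List.sum_nil]
    have hget : PySem.List.pyGetD list (n : Int) [] = v := by
      simp [List.getD_eq_getElem?_getD, hv]
    rw [hget, isPrime_eq]
    unfold pvInd
    split <;> ring

-- B's inner loop preserves the length of the counts array
theorem B_inner_len (row : List Int) (l : List Int) :
    ∀ (cs : List Int),
    (l.foldl
      (fun cs i =>
        if isPrimeB (PySem.List.pyGetD row i 0)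
        then PySem.List.pySetD cs i (PySem.List.pyGetD cs i 0 + 1)
        else cs) cs).length = cs.length := by
  induction l with
  | nil => intro cs; rfl
  | cons a l ih =>
    intro cs
    simp only [List.foldl_cons]
    split
    · rw [ih]; exact PySem.List.length_pySetD cs a _
    · exact ih cs

-- effect of B's inner loop on one cell
theorem B_inner_get (row : List Int) :
    ∀ (n : Nat) (cs : List Int) (k : Nat), n ≤ cs.length →
    PySem.List.pyGetD
      ((PySem.List.pyRange 0 (n : Int) 1).foldl
        (fun cs i =>
          if isPrimeB (PySem.List.pyGetD row i 0)
          then PySem.List.pySetD cs i (PySem.List.pyGetD cs i 0 + 1)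
          else cs) cs) (k : Int) 0
    = PySem.List.pyGetD cs (k : Int) 0 + (if k < n then pvInd row (k : Int) else 0) := by
  intro n
  induction n with
  | zero => intro cs k _; simp
  | succ n ih =>
    intro cs k hn
    have h1 : ((n : Int) + 1) = ((n + 1 : Nat) : Int) := by push_cast; ring
    rw [← h1, PySem.List.pyRange_one_succ_right (by positivity), List.foldl_append]
    simp only [List.foldl_cons, List.foldl_nil]
    have hlen : _ = cs.length := B_inner_len row (PySem.List.pyRange 0 (n : Int) 1) cs
    split
    · rename_i hp
      rw [PySem.List.pyGetD_pySetD_natCast _ n k _ _ (by rw [hlen]; omega)]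
      by_cases hk : k = n
      · subst hk
        rw [if_pos rfl, ih cs k (by omega), if_neg (by omega : ¬ k < k),
          if_pos (by omega : k < k + 1)]
        unfold pvInd
        rw [if_pos hp]
        ring
      · rw [if_neg hk, ih cs k (by omega)]
        by_cases hkn : k < n
        · rw [if_pos hkn, if_pos (by omega : k < n + 1)]
        · rw [if_neg hkn, if_neg (by omega : ¬ k < n + 1)]
    · rename_i hp
      rw [ih cs k (by omega)]
      by_cases hkn : k < n
      · rw [if_pos hkn, if_pos (by omega : k < n + 1)]
      · by_cases hkn1 : k < n + 1
        · have hkeq : k = n := by omega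
          subst hkeq
          rw [if_neg hkn, if_pos hkn1]
          unfold pvInd
          rw [if_neg hp]
        · rw [if_neg hkn, if_neg hkn1]

-- B's outer loop: length preserved
theorem B_outer_len (n : Nat) (rows : List (List Int)) :
    ∀ (cs : List Int),
    (rows.foldl
      (fun cs row =>
        (PySem.List.pyRange 0 (n : Int) 1).foldl
          (fun cs i =>
            if isPrimeB (PySem.List.pyGetD row i 0)
            then PySem.List.pySetD cs i (PySem.List.pyGetD cs i 0 + 1)
            else cs) cs) cs).length = cs.length := by
  induction rows with
  | nil => intro cs; rfl
  | cons r rows ih =>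
    intro cs
    simp only [List.foldl_cons]
    rw [ih, B_inner_len]

-- B's outer loop accumulates the per-column counts
theorem B_outer_get (n : Nat) (rows : List (List Int)) :
    ∀ (cs : List Int) (k : Nat), n ≤ cs.length → k < n →
    PySem.List.pyGetD
      (rows.foldl
        (fun cs row =>
          (PySem.List.pyRange 0 (n : Int) 1).foldl
            (fun cs i =>
              if isPrimeB (PySem.List.pyGetD row i 0)
              then PySem.List.pySetD cs i (PySem.List.pyGetD cs i 0 + 1)
              else cs) cs) cs) (k : Int) 0
    = PySem.List.pyGetD cs (k : Int) 0 + pvCol rows (k : Int) := by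
  induction rows with
  | nil => intro cs k _ _; simp [pvCol]
  | cons r rows ih =>
    intro cs k hn hk
    simp only [List.foldl_cons]
    rw [ih _ k (by rw [B_inner_len]; omega) hk]
    rw [B_inner_get r n cs k hn]
    simp only [pvCol, List.map_cons, List.sum_cons, if_pos hk]
    ring

-- the two selection folds agree (A threads a reset count in the state; B does not)
theorem sel_eq (g : Int → Int) :
    ∀ (l : List Int) (m p : Int),
    (l.foldl
      (fun (st : Int × Int × Int) i =>
        if st.1 + g i > st.2.1 then (0, st.1 + g i, i) else (0, st.2.1, st.2.2))
      (0, m, p)).2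
    = l.foldl (fun (st : Int × Int) i => if g i > st.1 then (g i, i) else st) (m, p) := by
  intro l
  induction l with
  | nil => intro m p; rfl
  | cons a l ih =>
    intro m p
    simp only [List.foldl_cons, zero_add]
    by_cases h : g a > m
    · simp only [if_pos h]; exact ih (g a) a
    · simp only [if_neg h]; exact ih m p

-- the degenerate case level ≤ 0: both return 0
theorem main_nonpos (list : List (List Int)) (level : Int) (h : level ≤ 0) :
    findRowPrime list level = findRowPrime_alt list level := by
  unfold findRowPrime findRowPrime_alt
  rw [PySem.List.pyRange_one_eq_nil h]
  have ht : level.toNat = 0 := by omega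
  simp [ht, List.foldl_fixed]

-- the main case level > 0
theorem main_pos (list : List (List Int)) (level : Int) (hpos : 0 < level)
    (hpre : Pre_findRowPrime list level) :
    findRowPrime list level = findRowPrime_alt list level := by
  obtain ⟨hlen, hrows⟩ := hpre
  obtain ⟨L, rfl⟩ : ∃ L : Nat, level = (L : Int) := ⟨level.toNat, by omega⟩
  rw [Int.toNat_natCast] at hlen hrows
  simp only [findRowPrime, findRowPrime_alt, Int.toNat_natCast]
  rw [PySem.List.slice_to_natCast list L]
  have hcountslen :
      ((list.take L).foldl
        (fun cs row =>
          (PySem.List.pyRange 0 (L : Int) 1).foldl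
            (fun cs i =>
              if isPrimeB (PySem.List.pyGetD row i 0)
              then PySem.List.pySetD cs i (PySem.List.pyGetD cs i 0 + 1)
              else cs) cs) (List.replicate L (0 : Int))).length = L := by
    rw [B_outer_len]; simp
  have hcell : ∀ (k : Nat), k < L →
      PySem.List.pyGetD
        ((list.take L).foldl
          (fun cs row =>
            (PySem.List.pyRange 0 (L : Int) 1).foldl
              (fun cs i =>
                if isPrimeB (PySem.List.pyGetD row i 0)
                then PySem.List.pySetD cs i (PySem.List.pyGetD cs i 0 + 1)
                else cs) cs) (List.replicate L (0 : Int))) (k : Int) 0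
      = pvCol (list.take L) (k : Int) := by
    intro k hk
    rw [B_outer_get L (list.take L) (List.replicate L 0) k (by simp) hk]
    simp
  -- rewrite A's outer fold body via A_inner
  conv_lhs =>
    rw [PySem.List.foldl_congr_mem _ _
      (fun (st : Int × Int × Int) i =>
        if st.1 + pvCol (list.take L) i > st.2.1 then (0, st.1 + pvCol (list.take L) i, i)
        else (0, st.2.1, st.2.2)) _
      (by
        intro acc x hx
        simp only [A_inner list x L hlen])]
  -- rewrite B's enumerate fold into a fold over the index range, cell values via hcell
  rw [PySem.List.enumerate_eq_map_pyRange _ (0 : Int), List.foldl_map,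
    PySem.List.len_eq, hcountslen]
  conv_rhs =>
    rw [PySem.List.foldl_congr_mem _ _
      (fun (st : Int × Int) j =>
        if pvCol (list.take L) j > st.1 then (pvCol (list.take L) j, j) else st) _
      (by
        intro acc x hx
        have hx' := (PySem.List.mem_pyRange_one).1 hx
        obtain ⟨k, rfl⟩ : ∃ k : Nat, x = (k : Int) := ⟨x.toNat, by omega⟩
        rw [hcell k (by exact_mod_cast hx'.2)])]
  exact congrArg Prod.snd
    (sel_eq (fun i => pvCol (list.take L) i) (PySem.List.pyRange 0 (L : Int) 1) 0 0)

-- ===== VERDICT (by name: the statement is the Claim_ definition above) =====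
theorem findRowPrime_spec : Claim_equal_findRowPrime := by
  intro list level _ hpre
  unfold Spec_findRowPrime
  by_cases h : level ≤ 0
  · exact main_nonpos list level h
  · exact main_pos list level (by omega) hpre
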